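-- pv_equiv track=rewrite | github.com/shmuye/Leetcode | apples_to_basket.py | numberOfApple
-- ===== SOURCE A (Python) =====
-- def numberOfApple(weight):
--     weight.sort()
--     n = len(weight)
--     prefix_sum = [0]*n
--     prefix_sum[0] = weight[0]
--     for i in range(1,n):
--         prefix_sum[i] = prefix_sum[i - 1] + weight[i]
--     for i in range(n):
--         if prefix_sum[i] > 5000:
--             return i
--     return n
-- ===== SOURCE B (Python) =====
-- def numberOfApple(weight):
--     # Like A, sorts `weight` in place (same observable mutation).
--     weight.sort()
--     total = weight[0]          # raises IndexError on [] just as A does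
--     if total > 5000:
--         return 0
--     n = len(weight)
--     for i in range(1, n):
--         total += weight[i]
--         if total > 5000:
--             return i
--     return n
-- ===== Notes on version B (the rewrite author's own statement) =====
-- stated objective: simpler
-- what changed: Replaces the materialized prefix-sum array plus a second full scan with a single running-total pass that returns the index as soon as the total exceeds 5000.
import Mathlib
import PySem

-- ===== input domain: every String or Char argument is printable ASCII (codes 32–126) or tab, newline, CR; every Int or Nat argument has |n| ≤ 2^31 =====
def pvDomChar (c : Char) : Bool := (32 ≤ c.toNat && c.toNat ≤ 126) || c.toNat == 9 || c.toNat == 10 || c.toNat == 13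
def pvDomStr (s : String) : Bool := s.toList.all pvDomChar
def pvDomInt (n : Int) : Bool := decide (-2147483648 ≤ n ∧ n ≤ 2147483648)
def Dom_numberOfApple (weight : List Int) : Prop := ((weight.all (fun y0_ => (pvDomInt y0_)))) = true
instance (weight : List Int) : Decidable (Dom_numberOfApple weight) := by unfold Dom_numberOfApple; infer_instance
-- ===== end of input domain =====

-- B replaces A's prefix-sum array + second scan by one running-total pass with early exit
-- (objective: simpler). Both Pythons sort `weight` in place; equivalence is about the return value.

-- ===== PORT A =====
-- for i in range(1, n): prefix_sum[i] = prefix_sum[i-1] + weight[i]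
-- (indices from pyRange 1 n are in [1, n), so .toNat and getD are exact here)
def pvBuildA (w : List Int) (ps : List Int) : List Int :=
  (PySem.List.pyRange 1 (w.length : Int) 1).foldl
    (fun ps i => ps.set i.toNat (ps.getD (i.toNat - 1) 0 + w.getD i.toNat 0)) ps

-- for i in range(n): if prefix_sum[i] > 5000: return i;  return n
def pvScanA : List Int → Int → Int
  | [], i => i
  | p :: rest, i => if p > 5000 then i else pvScanA rest (i + 1)

def numberOfApple (weight : List Int) : Int :=
  let w := PySem.List.sorted weight (fun x => x) false
  let n := w.length
  match w with
  | [] => 0  -- Python raises IndexError at prefix_sum[0] = weight[0]; excluded by Pre_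
  | x :: _ =>
    let init := (List.replicate n (0 : Int)).set 0 x   -- prefix_sum = [0]*n; prefix_sum[0] = weight[0]
    pvScanA (pvBuildA w init) 0

-- ===== PORT B =====
-- for i in range(1, n): total += weight[i]; if total > 5000: return i;  return n
def pvLoopB : List Int → Int → Int → Int
  | [], _, i => i
  | y :: rest, total, i =>
    let t := total + y
    if t > 5000 then i else pvLoopB rest t (i + 1)

def numberOfApple_alt (weight : List Int) : Int :=
  match PySem.List.sorted weight (fun x => x) false with
  | [] => 0  -- Python raises IndexError at weight[0]; excluded by Pre_
  | x :: rest => if x > 5000 then 0 else pvLoopB rest x 1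

-- ===== PRECONDITION & SPEC =====
-- Pre_ excludes only the empty list, on which Python A raises IndexError (weight[0]).
def Pre_numberOfApple (weight : List Int) : Prop := weight ≠ []
instance (weight : List Int) : Decidable (Pre_numberOfApple weight) := by
  unfold Pre_numberOfApple; infer_instance
def pvWitness_numberOfApple : List Int := [3000, 1000, 2500]

def Spec_numberOfApple (weight : List Int) (out : Int) : Prop := out = numberOfApple_alt weight
instance (weight : List Int) (out : Int) : Decidable (Spec_numberOfApple weight out) := by
  unfold Spec_numberOfApple; infer_instance

-- ===== CLAIM (what is proved, stated in full; the proofs are below) =====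
def Claim_equal_numberOfApple : Prop := ∀ (weight : List Int), Dom_numberOfApple weight → Pre_numberOfApple weight → Spec_numberOfApple weight (numberOfApple weight)

-- ===== LEMMAS AND PROOFS =====

-- the list of prefix sums of `rest` continuing from accumulator `acc`
def pvPrefList (acc : Int) : List Int → List Int
  | [] => []
  | y :: ys => (acc + y) :: pvPrefList (acc + y) ys

theorem pvBuild_inv (w : List Int) :
    ∀ (m k : Nat) (done : List Int) (acc : Int),
      done.length = k → 1 ≤ k → k + m = w.length →
      acc = done.getD (k - 1) 0 →
      (PySem.List.pyRange (k : Int) (w.length : Int) 1).foldl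
        (fun ps i => ps.set i.toNat (ps.getD (i.toNat - 1) 0 + w.getD i.toNat 0))
        (done ++ List.replicate m 0)
      = done ++ pvPrefList acc (w.drop k) := by
  intro m
  induction m with
  | zero =>
    intro k done acc hlen h1 hk hacc
    have hkk : k = w.length := by omega
    rw [PySem.List.pyRange_one_eq_nil (by exact_mod_cast le_of_eq hkk.symm)]
    simp [hkk, pvPrefList]
  | succ m ih =>
    intro k done acc hlen h1 hk hacc
    have hklt : k < w.length := by omega
    rw [PySem.List.pyRange_one_cons (by exact_mod_cast hklt)]
    simp only [List.foldl_cons]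
    -- the k-th weight
    obtain ⟨wk, rest', hdrop⟩ : ∃ wk rest', w.drop k = wk :: rest' := by
      cases hd : w.drop k with
      | nil => exfalso; have := List.length_drop (l := w) (i := k); rw [hd] at this; simp at this; omega
      | cons a b => exact ⟨a, b, rfl⟩
    have hw : w.getD ((k : Int).toNat) 0 = wk := by
      have h0 : w[k]? = some wk := by
        have : (w.drop k)[0]? = some wk := by rw [hdrop]; rfl
        rwa [List.getElem?_drop, Nat.add_zero] at this
      simp [List.getD, h0]
    have hget : (done ++ (0 : Int) :: List.replicate m 0).getD ((k : Int).toNat - 1) 0 = acc := by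
      have hlt : k - 1 < done.length := by omega
      rw [hacc]
      simp [List.getD, List.getElem?_append_left hlt]
    have hset : (done ++ (0 : Int) :: List.replicate m 0).set ((k : Int).toNat) (acc + wk)
        = (done ++ [acc + wk]) ++ List.replicate m 0 := by
      rw [List.set_append]
      simp [hlen]
    rw [List.replicate_succ, hget, hw, hset]
    have ihk := ih (k + 1) (done ++ [acc + wk]) (acc + wk)
        (by simp [hlen]) (by omega) (by omega)
        (by simp [List.getD, hlen])
    rw [show ((k:Int)+1) = ((k+1 : Nat) : Int) by push_cast; ring, ihk]
    have hdrop' : w.drop (k + 1) = rest' := by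
      have : w.drop (k + 1) = (w.drop k).drop 1 := by rw [List.drop_drop]
      rw [this, hdrop]; rfl
    push_cast
    rw [hdrop', hdrop]
    simp [pvPrefList]

theorem pvScan_loop : ∀ (rest : List Int) (acc i : Int),
    pvScanA (pvPrefList acc rest) i = pvLoopB rest acc i := by
  intro rest
  induction rest with
  | nil => intro acc i; rfl
  | cons y ys ih =>
    intro acc i
    simp only [pvPrefList, pvScanA, pvLoopB]
    split <;> simp [ih]

theorem pvBuildA_eq (x : Int) (rest : List Int) :
    pvBuildA (x :: rest) ((List.replicate (x :: rest).length (0 : Int)).set 0 x)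
      = x :: pvPrefList x rest := by
  unfold pvBuildA
  have hinit : (List.replicate (x :: rest).length (0 : Int)).set 0 x
      = [x] ++ List.replicate rest.length 0 := by
    simp [List.replicate_succ]
  rw [hinit]
  have := pvBuild_inv (x :: rest) rest.length 1 [x] x (by simp) (le_refl 1)
      (by simp; omega) (by simp)

  simpa using this

-- ===== VERDICT (by name: the statement is the Claim_ definition above) =====
theorem numberOfApple_spec : Claim_equal_numberOfApple := by
  intro weight _ hpre
  unfold Spec_numberOfApple numberOfApple numberOfApple_alt
  have hne : PySem.List.sorted weight (fun x => x) false ≠ [] := by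
    intro h
    have := PySem.List.length_sorted (xs := weight) (key := fun x => x) (rev := false)
    rw [h] at this
    exact hpre (List.eq_nil_of_length_eq_zero (by simpa using this.symm))
  cases hs : PySem.List.sorted weight (fun x => x) false with
  | nil => exact absurd hs hne
  | cons x rest =>
    simp only []
    rw [pvBuildA_eq]
    simp only [pvScanA]
    split <;> [rfl; exact pvScan_loop rest x 1]
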